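-- pv_equiv track=rewrite | github.com/molgenis/projects-solve-rd | python/rd3_novelomics_processing.py | map_rd3_subject
-- ===== SOURCE A (Python) =====
-- def distinct_dict(data: list = None, key: str = None):
--     """Distinct Dictionaries
--
--     In a list of dictionnaires, return distinct dictionaries by a given key
--
--     @param data a list containing one or more dictionaries
--     @param key one or more keys to filter by
--
--     @return a list of dictionaries
--     """
--     if key is None:
--         key = lambda x: x
--     seen = set()
--     for d in data:
--         k = key(d)
--         if k in seen:
--             continue
--         yield d
--         seen.add(k)
--     return seen
--
-- def map_rd3_subject(data, patch, distinct=True):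
--     """Map RD3 Subjects
--
--     Using a reference ID list, update patch data for matching subjects
--
--     @param data a list containing 1 or more dictionaries
--     @param patch string containing a new patch ID
--     @param distinct If True, unique patientis are returned
--
--     @return a list of dictionaries
--     """
--     out = []
--     for d in data:
--         tmp = {}
--         tmp['id'] = d.get('participant_subject') + '_' + patch
--         tmp['subjectID'] = d.get('participant_subject')
--         tmp['patch'] = patch
--         tmp['organisation'] = d.get('organisation')
--         tmp['ERN'] = d.get('ERN')
--         out.append(tmp)
--     if distinct:
--         return list(distinct_dict(out, key=lambda x: x['id'] ))
--     return out
-- ===== SOURCE B (Python) =====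
-- def _map_record(d, patch):
--     return {
--         'id': d.get('participant_subject') + '_' + patch,
--         'subjectID': d.get('participant_subject'),
--         'patch': patch,
--         'organisation': d.get('organisation'),
--         'ERN': d.get('ERN'),
--     }
--
--
-- def map_rd3_subject(data, patch, distinct=True):
--     """Single fused pass: dedup by id while mapping, building only the
--     records that are kept (A maps everything first, then dedups)."""
--     if not distinct:
--         return [_map_record(d, patch) for d in data]
--     seen = set()
--     out = []
--     for d in data:
--         key = d.get('participant_subject') + '_' + patch
--         if key in seen:
--             continue
--         out.append(_map_record(d, patch))
--         seen.add(key)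
--     return out
-- ===== Notes on version B (the rewrite author's own statement) =====
-- stated objective: alternative
-- what changed: Fuses A's two passes (map every record into an intermediate list, then deduplicate it with a generator helper keyed on id) into one loop over the raw data that keeps a seen-set of keys and builds a mapped dict only for each first occurrence; distinct=False is a plain comprehension.
-- outside the precondition, e.g. on map_rd3_subject([{'organisation': 'x'}], 'p1', True): A raises TypeError, B raises TypeError
import Mathlib
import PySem

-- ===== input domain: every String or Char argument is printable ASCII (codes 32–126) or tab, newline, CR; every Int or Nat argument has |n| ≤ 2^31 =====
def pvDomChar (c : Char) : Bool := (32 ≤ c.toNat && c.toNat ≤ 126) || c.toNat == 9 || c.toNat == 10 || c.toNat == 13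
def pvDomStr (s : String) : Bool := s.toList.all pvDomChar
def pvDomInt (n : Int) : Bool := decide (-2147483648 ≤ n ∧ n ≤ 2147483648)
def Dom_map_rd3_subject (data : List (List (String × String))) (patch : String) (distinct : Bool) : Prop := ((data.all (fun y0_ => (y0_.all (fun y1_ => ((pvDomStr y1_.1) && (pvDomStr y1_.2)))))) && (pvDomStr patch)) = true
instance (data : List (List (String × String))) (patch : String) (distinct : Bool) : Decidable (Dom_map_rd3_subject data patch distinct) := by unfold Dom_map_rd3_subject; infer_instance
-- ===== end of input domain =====

-- B fuses A's two passes (map all records, then dedup by id with a generator helper)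
-- into one loop with a seen-set that maps only first occurrences; same return value on Pre_.


-- ===== PORT A =====
-- d.get(k) on an association-list dict: first match, none when absent
def aDictGet (d : List (String × String)) (k : String) : Option String :=
  (d.find? (fun p => p.1 == k)).map (·.2)

-- the body of A's loop: tmp = {...} (keys in insertion order).
-- `.getD ""` is only reached where A raises TypeError (participant_subject missing) — excluded by Pre_.
def aMapRec (d : List (String × String)) (patch : String) : List (String × Option String) :=
  [("id", some ((aDictGet d "participant_subject").getD "" ++ "_" ++ patch)),
   ("subjectID", aDictGet d "participant_subject"),
   ("patch", some patch),
   ("organisation", aDictGet d "organisation"),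
   ("ERN", aDictGet d "ERN")]

-- key=lambda x: x['id'] (the key is always present in A's records; none is unreached)
def aKey (x : List (String × Option String)) : Option String :=
  match x.find? (fun p => p.1 == "id") with
  | some p => p.2
  | none => none

-- distinct_dict: yield first occurrence per key, carrying the `seen` set
def aDistinctDict (xs : List (List (String × Option String)))
    (seen : PySem.Set (Option String)) : List (List (String × Option String)) :=
  match xs with
  | [] => []
  | x :: rest =>
    let k := aKey x
    if PySem.Set.contains seen k then aDistinctDict rest seen
    else x :: aDistinctDict rest (PySem.Set.add seen k)

def map_rd3_subject (data : List (List (String × String))) (patch : String) (distinct : Bool) : List (List (String × Option String)) :=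
  let out := data.foldl (fun acc d => acc ++ [aMapRec d patch]) []
  if distinct then aDistinctDict out PySem.Set.empty else out

-- ===== PORT B =====
def bDictGet : List (String × String) → String → Option String
  | [], _ => none
  | (k, v) :: rest, q => if k == q then some v else bDictGet rest q

def bMapRec (d : List (String × String)) (patch : String) : List (String × Option String) :=
  [("id", some ((bDictGet d "participant_subject").getD "" ++ "_" ++ patch)),
   ("subjectID", bDictGet d "participant_subject"),
   ("patch", some patch),
   ("organisation", bDictGet d "organisation"),
   ("ERN", bDictGet d "ERN")]

-- the fused loop: dedup key computed from the raw record, map only first occurrences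
def bGo (data : List (List (String × String))) (patch : String)
    (seen : PySem.Set String) : List (List (String × Option String)) :=
  match data with
  | [] => []
  | d :: rest =>
    let key := (bDictGet d "participant_subject").getD "" ++ "_" ++ patch
    if PySem.Set.contains seen key then bGo rest patch seen
    else bMapRec d patch :: bGo rest patch (PySem.Set.add seen key)

def map_rd3_subject_alt (data : List (List (String × String))) (patch : String) (distinct : Bool) : List (List (String × Option String)) :=
  if distinct then bGo data patch PySem.Set.empty
  else data.map (fun d => bMapRec d patch)

-- ===== PRECONDITION & SPEC =====
-- Pre_ excludes exactly the inputs where A raises TypeError: some record has no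
-- 'participant_subject' key, so d.get(...) returns None and None + '_' fails.
def Pre_map_rd3_subject (data : List (List (String × String))) (patch : String) (distinct : Bool) : Prop :=
  data.all (fun d => d.any (fun p => p.1 == "participant_subject")) = true
instance (data : List (List (String × String))) (patch : String) (distinct : Bool) : Decidable (Pre_map_rd3_subject data patch distinct) := by unfold Pre_map_rd3_subject; infer_instance

def pvWitness_map_rd3_subject : (List (List (String × String))) × String × Bool :=
  ([[("participant_subject", "P1"), ("ERN", "e")], [("participant_subject", "P1")]], "novel", true)

def Spec_map_rd3_subject (data : List (List (String × String))) (patch : String) (distinct : Bool) (out : List (List (String × Option String))) : Prop := out = map_rd3_subject_alt data patch distinct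
instance (data : List (List (String × String))) (patch : String) (distinct : Bool) (out : List (List (String × Option String))) : Decidable (Spec_map_rd3_subject data patch distinct out) := by unfold Spec_map_rd3_subject; infer_instance

-- ===== CLAIM (what is proved, stated in full; the proofs are below) =====
def Claim_equal_map_rd3_subject : Prop := ∀ (data : List (List (String × String))) (patch : String) (distinct : Bool), Dom_map_rd3_subject data patch distinct → Pre_map_rd3_subject data patch distinct → Spec_map_rd3_subject data patch distinct (map_rd3_subject data patch distinct)

-- ===== LEMMAS AND PROOFS =====
theorem bDictGet_eq (d : List (String × String)) (k : String) :
    bDictGet d k = aDictGet d k := by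
  induction d with
  | nil => rfl
  | cons p rest ih =>
    obtain ⟨pk, pv⟩ := p
    by_cases h : pk = k
    · subst h; simp [bDictGet, aDictGet]
    · simp [bDictGet, aDictGet, h, ih]

theorem bMapRec_eq (d : List (String × String)) (patch : String) :
    bMapRec d patch = aMapRec d patch := by
  simp [bMapRec, aMapRec, bDictGet_eq]

theorem aKey_aMapRec (d : List (String × String)) (patch : String) :
    aKey (aMapRec d patch) = some ((aDictGet d "participant_subject").getD "" ++ "_" ++ patch) := by
  rfl

theorem contains_map_some {α : Type} [DecidableEq α] (s : List α) (k : α) :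
    PySem.Set.contains (s.map some) (some k) = PySem.Set.contains s k := by
  simp only [PySem.Set.contains_eq_listContains]
  simp

theorem add_map_some {α : Type} [DecidableEq α] (s : List α) (k : α) :
    PySem.Set.add (s.map some) (some k) = (PySem.Set.add s k).map some := by
  simp only [PySem.Set.add, contains_map_some]
  split <;> simp

-- main fused-loop invariant: A's dedup over the mapped list equals B's fused loop,
-- with A's seen-set the `some`-image of B's
theorem go_eq (data : List (List (String × String))) (patch : String) (seen : List String) :
    aDistinctDict (data.map (fun d => aMapRec d patch)) (seen.map some) = bGo data patch seen := by
  induction data generalizing seen with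
  | nil => rfl
  | cons d rest ih =>
    simp only [List.map_cons, aDistinctDict, bGo, aKey_aMapRec, bDictGet_eq, contains_map_some]
    split
    · exact ih seen
    · rw [bMapRec_eq, add_map_some, ih]

-- ===== VERDICT (by name: the statement is the Claim_ definition above) =====
theorem map_rd3_subject_spec : Claim_equal_map_rd3_subject := by
  intro data patch distinct _ _
  show map_rd3_subject data patch distinct = map_rd3_subject_alt data patch distinct
  simp only [map_rd3_subject, map_rd3_subject_alt,
    PySem.List.foldl_append_singleton_eq_map, List.nil_append]
  cases distinct with
  | false => simp [bMapRec_eq]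
  | true =>
    have := go_eq data patch []
    simpa [PySem.Set.empty] using this
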